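-- pv_equiv track=rewrite | github.com/SujayJayakumar/SC26-job-reclamation | Data/rakesha_experiment/extract_rakesha_telemetry.py | matching_jobs_for_row
-- ===== SOURCE A (Python) =====
-- def matching_jobs_for_row(node_jobs, timestamp):
--     matches = []
--     for job in node_jobs:
--         if job["start_time"] <= timestamp <= job["end_time"]:
--             matches.append(job)
--         elif job["start_time"] > timestamp:
--             break
--     return matches
-- ===== SOURCE B (Python) =====
-- def matching_jobs_for_row(node_jobs, timestamp):
--     if not node_jobs or node_jobs[0]["start_time"] > timestamp:
--         return []
--     job = node_jobs[0]
--     rest = matching_jobs_for_row(node_jobs[1:], timestamp)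
--     return [job] + rest if timestamp <= job["end_time"] else rest
-- ===== Notes on version B (the rewrite author's own statement) =====
-- stated objective: alternative
-- what changed: Replaces A's imperative loop with accumulator and break by a structural recursion that stops at the first job whose start_time exceeds the timestamp and conses matching jobs front-to-back.
import Mathlib
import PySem

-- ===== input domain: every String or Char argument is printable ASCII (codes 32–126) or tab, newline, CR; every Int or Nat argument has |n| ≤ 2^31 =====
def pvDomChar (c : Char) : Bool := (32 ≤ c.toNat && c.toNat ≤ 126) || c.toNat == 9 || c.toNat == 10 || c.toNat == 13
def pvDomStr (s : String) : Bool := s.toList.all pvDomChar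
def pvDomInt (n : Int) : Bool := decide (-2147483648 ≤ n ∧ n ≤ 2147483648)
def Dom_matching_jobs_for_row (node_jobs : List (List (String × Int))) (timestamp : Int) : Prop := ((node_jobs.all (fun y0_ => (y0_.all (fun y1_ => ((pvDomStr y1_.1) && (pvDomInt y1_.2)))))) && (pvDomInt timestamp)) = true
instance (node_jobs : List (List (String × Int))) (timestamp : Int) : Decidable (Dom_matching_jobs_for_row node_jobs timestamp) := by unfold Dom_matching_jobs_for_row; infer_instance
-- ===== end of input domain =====

-- B replaces A's imperative loop-with-break and accumulator by a structural recursion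
-- that stops at the first job whose start_time exceeds the timestamp (alternative decomposition).


-- ===== PORT A =====
-- A's loop over node_jobs with accumulator `acc` and early `break`.
-- Key lookups use getD 0; Pre_ guarantees both keys are present, so the default never fires.
def mjA_go (timestamp : Int) : List (List (String × Int)) → List (List (String × Int)) → List (List (String × Int))
  | [], acc => acc
  | job :: rest, acc =>
    if PySem.Dict.getD (PySem.Dict.mk job) "start_time" 0 ≤ timestamp ∧ timestamp ≤ PySem.Dict.getD (PySem.Dict.mk job) "end_time" 0 then
      mjA_go timestamp rest (acc ++ [job])
    else if PySem.Dict.getD (PySem.Dict.mk job) "start_time" 0 > timestamp then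
      acc
    else
      mjA_go timestamp rest acc

def matching_jobs_for_row (node_jobs : List (List (String × Int))) (timestamp : Int) : List (List (String × Int)) :=
  mjA_go timestamp node_jobs []

-- ===== PORT B =====
-- B's structural recursion: empty or first start_time past the timestamp → []; else recurse on the tail.
def matching_jobs_for_row_alt (node_jobs : List (List (String × Int))) (timestamp : Int) : List (List (String × Int)) :=
  match node_jobs with
  | [] => []
  | job :: rest =>
    if PySem.Dict.getD (PySem.Dict.mk job) "start_time" 0 > timestamp then []
    else if timestamp ≤ PySem.Dict.getD (PySem.Dict.mk job) "end_time" 0 then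
      job :: matching_jobs_for_row_alt rest timestamp
    else
      matching_jobs_for_row_alt rest timestamp

-- ===== PRECONDITION & SPEC =====
-- Pre_ excludes exactly the inputs on which A raises KeyError: a job the scan actually reaches
-- (every earlier job has both keys and start_time <= timestamp) must have "start_time", and also
-- "end_time" whenever its start_time <= timestamp (A short-circuits past end_time otherwise).
def Pre_matching_jobs_for_row (node_jobs : List (List (String × Int))) (timestamp : Int) : Prop :=
  ∀ i : Fin node_jobs.length,
    (∀ j : Fin node_jobs.length, j.val < i.val →
       (∃ s, PySem.Dict.get? (PySem.Dict.mk node_jobs[j]) "start_time" = some s ∧ s ≤ timestamp) ∧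
       (PySem.Dict.get? (PySem.Dict.mk node_jobs[j]) "end_time").isSome) →
    (PySem.Dict.get? (PySem.Dict.mk node_jobs[i]) "start_time").isSome ∧
    (∀ s, PySem.Dict.get? (PySem.Dict.mk node_jobs[i]) "start_time" = some s → s ≤ timestamp →
       (PySem.Dict.get? (PySem.Dict.mk node_jobs[i]) "end_time").isSome)
instance (node_jobs : List (List (String × Int))) (timestamp : Int) : Decidable (Pre_matching_jobs_for_row node_jobs timestamp) := by unfold Pre_matching_jobs_for_row; infer_instance
def pvWitness_matching_jobs_for_row : (List (List (String × Int))) × Int :=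
  ([[("start_time", 1), ("end_time", 3)], [("start_time", 2), ("end_time", 2)]], 2)
def Spec_matching_jobs_for_row (node_jobs : List (List (String × Int))) (timestamp : Int) (out : List (List (String × Int))) : Prop := out = matching_jobs_for_row_alt node_jobs timestamp
instance (node_jobs : List (List (String × Int))) (timestamp : Int) (out : List (List (String × Int))) : Decidable (Spec_matching_jobs_for_row node_jobs timestamp out) := by unfold Spec_matching_jobs_for_row; infer_instance

-- ===== CLAIM (what is proved, stated in full; the proofs are below) =====
def Claim_equal_matching_jobs_for_row : Prop := ∀ (node_jobs : List (List (String × Int))) (timestamp : Int), Dom_matching_jobs_for_row node_jobs timestamp → Pre_matching_jobs_for_row node_jobs timestamp → Spec_matching_jobs_for_row node_jobs timestamp (matching_jobs_for_row node_jobs timestamp)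

-- ===== LEMMAS AND PROOFS =====
-- Loop invariant: A's accumulator-passing loop equals the accumulator appended to B's recursion.
theorem mjA_go_eq_alt (timestamp : Int) (l acc : List (List (String × Int))) :
    mjA_go timestamp l acc = acc ++ matching_jobs_for_row_alt l timestamp := by
  induction l generalizing acc with
  | nil => simp [mjA_go, matching_jobs_for_row_alt]
  | cons job rest ih =>
    simp only [mjA_go, matching_jobs_for_row_alt]
    by_cases h1 : PySem.Dict.getD (PySem.Dict.mk job) "start_time" 0 ≤ timestamp ∧ timestamp ≤ PySem.Dict.getD (PySem.Dict.mk job) "end_time" 0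
    · have hns : ¬ PySem.Dict.getD (PySem.Dict.mk job) "start_time" 0 > timestamp := by omega
      simp [h1, hns, ih]
    · by_cases h2 : PySem.Dict.getD (PySem.Dict.mk job) "start_time" 0 > timestamp
      · simp [h1, h2]
      · have hne : ¬ timestamp ≤ PySem.Dict.getD (PySem.Dict.mk job) "end_time" 0 := by omega
        simp [h2, hne, ih]

-- ===== VERDICT (by name: the statement is the Claim_ definition above) =====
theorem matching_jobs_for_row_spec : Claim_equal_matching_jobs_for_row := by
  intro node_jobs timestamp _ _
  unfold Spec_matching_jobs_for_row matching_jobs_for_row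
  simpa using mjA_go_eq_alt timestamp node_jobs []
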